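-- pv_equiv track=rewrite | github.com/fouadaab/educative | data_structures/binary_search/bitonic_peak.py | find_bitonic_peak
-- ===== SOURCE A (Python) =====
-- from typing import List, Union
--
-- def find_bitonic_peak(arr: List[int]) -> Union[int, None]:
--     left = 0
--     right = len(arr) - 1
--
--     # Require at least 3 elements for a bitonic sequence.
--     if len(arr) < 3:
--         return None
--
--     while left <= right:
--         mid = (left + right)//2
--         mid_left = max(0, mid-1)
--         mid_right = min(len(arr)-1, mid+1)
--
--         if arr[mid] > arr[mid_right] and arr[mid_left] > arr[mid]:
--             right = mid - 1
--
--         elif arr[mid_right] > arr[mid] and arr[mid] > arr[mid_left]: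
--             left = mid + 1
--
--         else:
--             return arr[mid]
--
--     return None
-- ===== SOURCE B (Python) =====
-- from typing import List, Union
--
-- def _probe(arr: List[int], mid: int) -> int:
--     """Classify the clamped 3-window at mid: -1 strictly descending, +1 strictly ascending, 0 otherwise."""
--     n = len(arr)
--     a = arr[mid - 1 if mid > 0 else 0]
--     b = arr[mid]
--     c = arr[mid + 1 if mid + 1 < n else n - 1]
--     if a > b > c:
--         return -1
--     if a < b < c:
--         return 1
--     return 0
--
-- def _descend(arr: List[int], lo: int, hi: int) -> Union[int, None]:
--     if hi < lo:
--         return None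
--     mid = (lo + hi) // 2
--     d = _probe(arr, mid)
--     if d == 0:
--         return arr[mid]
--     if d < 0:
--         return _descend(arr, lo, mid - 1)
--     return _descend(arr, mid + 1, hi)
--
-- def find_bitonic_peak(arr: List[int]) -> Union[int, None]:
--     # Require at least 3 elements for a bitonic sequence.
--     if len(arr) < 3:
--         return None
--     return _descend(arr, 0, len(arr) - 1)
-- ===== Notes on version B (the rewrite author's own statement) =====
-- stated objective: alternative
-- what changed: A's single while-loop with mutable bounds and two big inline comparison chains is re-decomposed into a pure 3-window classifier _probe returning a direction (-1/0/+1) plus a recursive range-splitter _descend driven by that direction, with the clamped neighbour indices written as conditional indices instead of max/min.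
import Mathlib
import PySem

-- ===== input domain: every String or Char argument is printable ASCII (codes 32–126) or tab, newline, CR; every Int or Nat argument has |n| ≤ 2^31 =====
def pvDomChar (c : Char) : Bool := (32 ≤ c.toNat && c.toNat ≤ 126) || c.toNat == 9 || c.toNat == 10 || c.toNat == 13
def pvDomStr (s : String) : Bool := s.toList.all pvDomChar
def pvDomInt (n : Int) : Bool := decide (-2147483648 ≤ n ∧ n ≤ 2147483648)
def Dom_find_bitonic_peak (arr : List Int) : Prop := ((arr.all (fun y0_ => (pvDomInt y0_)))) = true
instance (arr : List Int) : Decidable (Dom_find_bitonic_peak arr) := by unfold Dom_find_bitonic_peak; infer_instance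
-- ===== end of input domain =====

-- B re-decomposes A's while loop into a pure 3-window direction classifier plus a recursive
-- range-splitter driven by it (objective: alternative; same asymptotic cost).

-- ===== PORT A =====
-- A's while loop, state (left, right); Python's locals mid / mid_left / mid_right are written
-- inline (mid = (left+right)//2, mid_left = max(0, mid-1), mid_right = min(len-1, mid+1)).
-- Indexing is exact: the code clamps every index into [0, len-1] itself (max 0 / min (len-1)),
-- and mid stays in [left, right] ⊆ [0, len-1], so pyGetD's default is never consulted.
-- fuel is only a structural totality guard: the range [left, right] shrinks every iteration, so
-- the initial fuel arr.length + 1 supplied below is never exhausted.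
def pvA_loop (arr : List Int) (left right : Int) : Nat → Option Int
  | 0 => none
  | fuel + 1 =>
    if left ≤ right then
      if PySem.List.pyGetD arr (PySem.Int.floordiv (left + right) 2) 0 >
           PySem.List.pyGetD arr (min ((arr.length : Int) - 1) (PySem.Int.floordiv (left + right) 2 + 1)) 0 ∧
         PySem.List.pyGetD arr (max 0 (PySem.Int.floordiv (left + right) 2 - 1)) 0 >
           PySem.List.pyGetD arr (PySem.Int.floordiv (left + right) 2) 0 then
        pvA_loop arr left (PySem.Int.floordiv (left + right) 2 - 1) fuel
      else if PySem.List.pyGetD arr (min ((arr.length : Int) - 1) (PySem.Int.floordiv (left + right) 2 + 1)) 0 >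
                PySem.List.pyGetD arr (PySem.Int.floordiv (left + right) 2) 0 ∧
              PySem.List.pyGetD arr (PySem.Int.floordiv (left + right) 2) 0 >
                PySem.List.pyGetD arr (max 0 (PySem.Int.floordiv (left + right) 2 - 1)) 0 then
        pvA_loop arr (PySem.Int.floordiv (left + right) 2 + 1) right fuel
      else
        some (PySem.List.pyGetD arr (PySem.Int.floordiv (left + right) 2) 0)
    else
      none

def find_bitonic_peak (arr : List Int) : Option Int :=
  if (arr.length : Int) < 3 then none
  else pvA_loop arr 0 ((arr.length : Int) - 1) (arr.length + 1)

-- ===== PORT B =====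
-- Source B's _probe: the locals a, b, c become lets; the chained comparisons become conjunctions;
-- the conditional indices 'mid - 1 if mid > 0 else 0' / 'mid + 1 if mid + 1 < n else n - 1'
-- become if-expressions in index position. All indices are in range, so pyGetD is exact.
def pvProbe (arr : List Int) (mid : Int) : Int :=
  let a := PySem.List.pyGetD arr (if mid > 0 then mid - 1 else 0) 0
  let b := PySem.List.pyGetD arr mid 0
  let c := PySem.List.pyGetD arr (if mid + 1 < (arr.length : Int) then mid + 1 else (arr.length : Int) - 1) 0
  if a > b ∧ b > c then -1
  else if a < b ∧ b < c then 1
  else 0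

-- Source B's recursive _descend; fuel is only a structural totality guard (the range shrinks each
-- call), never exhausted with the arr.length + 1 supplied below.
def pvDescend (arr : List Int) (lo hi : Int) : Nat → Option Int
  | 0 => none
  | fuel + 1 =>
    if hi < lo then none
    else
      let mid := PySem.Int.floordiv (lo + hi) 2
      let d := pvProbe arr mid
      if d = 0 then some (PySem.List.pyGetD arr mid 0)
      else if d < 0 then pvDescend arr lo (mid - 1) fuel
      else pvDescend arr (mid + 1) hi fuel

def find_bitonic_peak_alt (arr : List Int) : Option Int :=
  if (arr.length : Int) < 3 then none
  else pvDescend arr 0 ((arr.length : Int) - 1) (arr.length + 1)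

-- ===== PRECONDITION & SPEC =====
def Spec_find_bitonic_peak (arr : List Int) (out : Option Int) : Prop := out = find_bitonic_peak_alt arr
instance (arr : List Int) (out : Option Int) : Decidable (Spec_find_bitonic_peak arr out) := by unfold Spec_find_bitonic_peak; infer_instance

-- ===== CLAIM (what is proved, stated in full; the proofs are below) =====
def Claim_equal_find_bitonic_peak : Prop := ∀ (arr : List Int), Dom_find_bitonic_peak arr → Spec_find_bitonic_peak arr (find_bitonic_peak arr)

-- ===== LEMMAS AND PROOFS =====
-- B's conditional indices equal A's clamped indices.
lemma pv_idxL (mid : Int) : (if mid > 0 then mid - 1 else 0) = max 0 (mid - 1) := by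
  split_ifs <;> omega

lemma pv_idxR (n mid : Int) : (if mid + 1 < n then mid + 1 else n - 1) = min (n - 1) (mid + 1) := by
  split_ifs <;> omega

-- A's loop and B's probe-driven recursion agree on every (lo, hi) and fuel: probe's three cases
-- are exactly A's three branches (with the conjuncts of each condition swapped), and both
-- recurse on the same shrunken range.
lemma pv_loop_eq_descend (arr : List Int) (lo hi : Int) (fuel : Nat) :
    pvA_loop arr lo hi fuel = pvDescend arr lo hi fuel := by
  induction fuel generalizing lo hi with
  | zero => rfl
  | succ fuel ih =>
    rw [pvA_loop, pvDescend]
    by_cases hle : lo ≤ hi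
    · simp only [if_pos hle, if_neg (by omega : ¬ hi < lo), pvProbe, pv_idxL, pv_idxR]
      set a := PySem.List.pyGetD arr (max 0 (PySem.Int.floordiv (lo + hi) 2 - 1)) 0 with ha
      set b := PySem.List.pyGetD arr (PySem.Int.floordiv (lo + hi) 2) 0 with hb
      set c := PySem.List.pyGetD arr (min ((arr.length : Int) - 1) (PySem.Int.floordiv (lo + hi) 2 + 1)) 0 with hc
      by_cases h1 : a > b ∧ b > c
      · simp only [if_pos (show b > c ∧ a > b from ⟨h1.2, h1.1⟩), if_pos h1]
        norm_num
        exact ih lo _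
      · rw [if_neg (fun h => h1 ⟨h.2, h.1⟩), if_neg h1]
        by_cases h2 : a < b ∧ b < c
        · simp only [if_pos (show c > b ∧ b > a from ⟨h2.2, h2.1⟩), if_pos h2]
          norm_num
          exact ih _ hi
        · rw [if_neg (fun h => h2 ⟨h.2, h.1⟩), if_neg h2]
          norm_num
    · simp only [if_neg hle, if_pos (by omega : hi < lo)]

-- ===== VERDICT (by name: the statement is the Claim_ definition above) =====
theorem find_bitonic_peak_spec : Claim_equal_find_bitonic_peak := by
  intro arr _
  unfold Spec_find_bitonic_peak find_bitonic_peak find_bitonic_peak_alt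
  by_cases h : (arr.length : Int) < 3
  · simp [h]
  · simp [h, pv_loop_eq_descend]
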